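-- pv_equiv track=rewrite | github.com/sreehitha4/Sparsha-AI-Skin-Health | sparsha-master/sparsha-master/services/skincare_agent.py | _analyze_occupation
-- ===== SOURCE A (Python) =====
-- def _analyze_occupation(occupation: str) -> str:
--     """Analyze occupation and its impact on skincare needs"""
--     if not occupation:
--         return "Occupation not specified. Use general lifestyle recommendations."
--
--     occupation_lower = occupation.lower()
--
--     # Indoor/office jobs
--     if any(word in occupation_lower for word in ["engineer", "developer", "programmer", "designer", "office", "desk", "admin", "manager", "analyst"]):
--         return "Indoor/office work: Prolonged screen time may cause eye strain and blue light exposure. Air conditioning can dry skin. Focus on hydration, eye care, and regular breaks."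
--
--     # Outdoor jobs
--     elif any(word in occupation_lower for word in ["construction", "outdoor", "field", "delivery", "driver", "farming", "gardening"]):
--         return "Outdoor work: High sun exposure, pollution, and environmental stressors. Emphasize strong sun protection, antioxidant serums, and barrier repair. Post-work cleansing is crucial."
--
--     # Healthcare
--     elif any(word in occupation_lower for word in ["doctor", "nurse", "medical", "healthcare", "hospital"]):
--         return "Healthcare work: Frequent hand washing, mask-wearing, and stress can affect skin. Focus on barrier repair, gentle cleansing, and stress management for skin health."
--
--     # Creative/beauty
--     elif any(word in occupation_lower for word in ["makeup", "beauty", "stylist", "photographer", "model"]):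
--         return "Beauty/creative work: Frequent product use and makeup may require double cleansing and skin barrier support. Regular skin detox days recommended."
--
--     # Service industry
--     elif any(word in occupation_lower for word in ["server", "waiter", "retail", "sales", "customer service"]):
--         return "Service industry: Variable environments, stress, and irregular schedules. Focus on adaptable routine, stress management, and consistent basics."
--
--     # Education
--     elif any(word in occupation_lower for word in ["teacher", "professor", "educator", "student"]):
--         return "Education: Stress, long hours, and exposure to various environments. Focus on stress management, consistent routine, and protective products."
--
--     else:
--         return f"Occupation: {occupation}. Consider work environment (indoor/outdoor), stress levels, and schedule when recommending skincare routine."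
-- ===== SOURCE B (Python) =====
-- _OCC_MESSAGES = [
--     "Indoor/office work: Prolonged screen time may cause eye strain and blue light exposure. Air conditioning can dry skin. Focus on hydration, eye care, and regular breaks.",
--     "Outdoor work: High sun exposure, pollution, and environmental stressors. Emphasize strong sun protection, antioxidant serums, and barrier repair. Post-work cleansing is crucial.",
--     "Healthcare work: Frequent hand washing, mask-wearing, and stress can affect skin. Focus on barrier repair, gentle cleansing, and stress management for skin health.",
--     "Beauty/creative work: Frequent product use and makeup may require double cleansing and skin barrier support. Regular skin detox days recommended.",
--     "Service industry: Variable environments, stress, and irregular schedules. Focus on adaptable routine, stress management, and consistent basics.",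
--     "Education: Stress, long hours, and exposure to various environments. Focus on stress management, consistent routine, and protective products.",
-- ]
--
-- _OCC_GROUPS = [
--     ["engineer", "developer", "programmer", "designer", "office", "desk", "admin", "manager", "analyst"],
--     ["construction", "outdoor", "field", "delivery", "driver", "farming", "gardening"],
--     ["doctor", "nurse", "medical", "healthcare", "hospital"],
--     ["makeup", "beauty", "stylist", "photographer", "model"],
--     ["server", "waiter", "retail", "sales", "customer service"],
--     ["teacher", "professor", "educator", "student"],
-- ]
--
-- # one flat keyword -> category-index map
-- _OCC_KEYWORDS = [(word, cat) for cat, words in enumerate(_OCC_GROUPS) for word in words]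
--
--
-- def _analyze_occupation(occupation: str) -> str:
--     if not occupation:
--         return "Occupation not specified. Use general lifestyle recommendations."
--     low = occupation.lower()
--     # single aggregation pass: minimum category index over ALL matching keywords
--     best = None
--     for word, cat in _OCC_KEYWORDS:
--         if word in low and (best is None or cat < best):
--             best = cat
--     if best is None:
--         return f"Occupation: {occupation}. Consider work environment (indoor/outdoor), stress levels, and schedule when recommending skincare routine."
--     return _OCC_MESSAGES[best]
-- ===== Notes on version B (the rewrite author's own statement) =====
-- stated objective: alternative
-- what changed: Replaces the priority if/elif chain over keyword groups (early return on first matching group) by one flat keyword->category-index map aggregated in a single min-index pass over all keywords, then an array lookup of the message; the minimum matching category index equals A's first matching group.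
import Mathlib
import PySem

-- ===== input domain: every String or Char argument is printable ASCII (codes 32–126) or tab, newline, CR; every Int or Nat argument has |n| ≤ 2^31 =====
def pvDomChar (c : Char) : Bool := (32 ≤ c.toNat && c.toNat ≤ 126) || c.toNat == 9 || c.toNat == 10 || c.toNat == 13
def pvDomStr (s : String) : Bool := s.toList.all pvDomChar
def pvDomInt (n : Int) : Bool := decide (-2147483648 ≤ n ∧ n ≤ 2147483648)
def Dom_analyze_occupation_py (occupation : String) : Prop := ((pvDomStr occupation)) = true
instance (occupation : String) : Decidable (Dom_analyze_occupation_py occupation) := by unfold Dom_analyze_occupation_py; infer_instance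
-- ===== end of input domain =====

-- B replaces A's priority if/elif chain (early return on first matching keyword group) by a flat keyword->category-index map aggregated in one min-index pass, then an array lookup (objective: alternative).


-- ===== PORT A =====
def analyze_occupation_py (occupation : String) : String :=
  if occupation == "" then
    "Occupation not specified. Use general lifestyle recommendations."
  else
    let occupation_lower := PySem.Str.lower occupation
    if (["engineer", "developer", "programmer", "designer", "office", "desk", "admin", "manager", "analyst"].any
        (fun word => PySem.Str.isIn word occupation_lower)) then
      "Indoor/office work: Prolonged screen time may cause eye strain and blue light exposure. Air conditioning can dry skin. Focus on hydration, eye care, and regular breaks."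
    else if (["construction", "outdoor", "field", "delivery", "driver", "farming", "gardening"].any
        (fun word => PySem.Str.isIn word occupation_lower)) then
      "Outdoor work: High sun exposure, pollution, and environmental stressors. Emphasize strong sun protection, antioxidant serums, and barrier repair. Post-work cleansing is crucial."
    else if (["doctor", "nurse", "medical", "healthcare", "hospital"].any
        (fun word => PySem.Str.isIn word occupation_lower)) then
      "Healthcare work: Frequent hand washing, mask-wearing, and stress can affect skin. Focus on barrier repair, gentle cleansing, and stress management for skin health."
    else if (["makeup", "beauty", "stylist", "photographer", "model"].any
        (fun word => PySem.Str.isIn word occupation_lower)) then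
      "Beauty/creative work: Frequent product use and makeup may require double cleansing and skin barrier support. Regular skin detox days recommended."
    else if (["server", "waiter", "retail", "sales", "customer service"].any
        (fun word => PySem.Str.isIn word occupation_lower)) then
      "Service industry: Variable environments, stress, and irregular schedules. Focus on adaptable routine, stress management, and consistent basics."
    else if (["teacher", "professor", "educator", "student"].any
        (fun word => PySem.Str.isIn word occupation_lower)) then
      "Education: Stress, long hours, and exposure to various environments. Focus on stress management, consistent routine, and protective products."
    else
      "Occupation: " ++ occupation ++ ". Consider work environment (indoor/outdoor), stress levels, and schedule when recommending skincare routine."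

-- ===== PORT B =====
def occMessages : List String :=
  [ "Indoor/office work: Prolonged screen time may cause eye strain and blue light exposure. Air conditioning can dry skin. Focus on hydration, eye care, and regular breaks.",
    "Outdoor work: High sun exposure, pollution, and environmental stressors. Emphasize strong sun protection, antioxidant serums, and barrier repair. Post-work cleansing is crucial.",
    "Healthcare work: Frequent hand washing, mask-wearing, and stress can affect skin. Focus on barrier repair, gentle cleansing, and stress management for skin health.",
    "Beauty/creative work: Frequent product use and makeup may require double cleansing and skin barrier support. Regular skin detox days recommended.",
    "Service industry: Variable environments, stress, and irregular schedules. Focus on adaptable routine, stress management, and consistent basics.",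
    "Education: Stress, long hours, and exposure to various environments. Focus on stress management, consistent routine, and protective products." ]

def occGroups : List (List String) :=
  [ ["engineer", "developer", "programmer", "designer", "office", "desk", "admin", "manager", "analyst"],
    ["construction", "outdoor", "field", "delivery", "driver", "farming", "gardening"],
    ["doctor", "nurse", "medical", "healthcare", "hospital"],
    ["makeup", "beauty", "stylist", "photographer", "model"],
    ["server", "waiter", "retail", "sales", "customer service"],
    ["teacher", "professor", "educator", "student"] ]

-- the flat comprehension  [(word, cat) for cat, words in enumerate(_OCC_GROUPS) for word in words]
def occKeywords : List (String × Int) :=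
  (PySem.List.enumerate occGroups 0).flatMap (fun p => p.2.map (fun word => (word, p.1)))

-- the loop body:  if word in low and (best is None or cat < best): best = cat
def occStep (low : String) (best : Option Int) (wc : String × Int) : Option Int :=
  if PySem.Str.isIn wc.1 low && (match best with | none => true | some m => decide (wc.2 < m)) then
    some wc.2
  else best

def analyze_occupation_py_alt (occupation : String) : String :=
  if occupation == "" then
    "Occupation not specified. Use general lifestyle recommendations."
  else
    let low := PySem.Str.lower occupation
    match occKeywords.foldl (occStep low) none with
    | none =>
      "Occupation: " ++ occupation ++ ". Consider work environment (indoor/outdoor), stress levels, and schedule when recommending skincare routine."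
    | some best => (PySem.List.pyGet? occMessages best).getD ""  -- _OCC_MESSAGES[best]; best is always 0..5, in range

-- ===== PRECONDITION & SPEC =====
def Spec_analyze_occupation_py (occupation : String) (out : String) : Prop := out = analyze_occupation_py_alt occupation
instance (occupation : String) (out : String) : Decidable (Spec_analyze_occupation_py occupation out) := by unfold Spec_analyze_occupation_py; infer_instance

-- ===== CLAIM (what is proved, stated in full; the proofs are below) =====
def Claim_equal_analyze_occupation_py : Prop := ∀ (occupation : String), Dom_analyze_occupation_py occupation → Spec_analyze_occupation_py occupation (analyze_occupation_py occupation)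

-- ===== LEMMAS AND PROOFS =====

-- merging one category index i into the running minimum
def occMerge (acc : Option Int) (i : Int) : Option Int :=
  match acc with
  | none => some i
  | some m => if i < m then some i else some m

theorem occMerge_idem (acc : Option Int) (i : Int) :
    occMerge (occMerge acc i) i = occMerge acc i := by
  cases acc with
  | none => simp [occMerge]
  | some m => by_cases h : i < m <;> simp [occMerge, h]

-- folding one keyword group (all carrying the same category index i):
-- the running minimum is updated with i iff some keyword of the group matches
theorem occFold_group (low : String) (i : Int) (ws : List String) (acc : Option Int) :
    (ws.map (fun word => (word, i))).foldl (occStep low) acc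
      = if ws.any (fun w => PySem.Str.isIn w low) then occMerge acc i else acc := by
  induction ws generalizing acc with
  | nil => simp
  | cons w ws ih =>
    simp only [List.map_cons, List.foldl_cons, List.any_cons, ih]
    by_cases hw : PySem.Str.isIn w low = true
    · have hstep : occStep low acc (w, i) = occMerge acc i := by
        cases acc with
        | none => simp only [occStep, occMerge, hw, Bool.true_and]; rfl
        | some m =>
          simp only [occStep, occMerge, hw, Bool.true_and, decide_eq_true_eq]
      rw [hstep]
      have hcond : (PySem.Str.isIn w low || ws.any fun w => PySem.Str.isIn w low) = true := by
        rw [hw]; rfl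
      by_cases hrest : (ws.any fun w => PySem.Str.isIn w low) = true
      · rw [if_pos hrest, if_pos hcond, occMerge_idem]
      · rw [if_neg hrest, if_pos hcond]
    · rw [Bool.not_eq_true] at hw
      have hstep : occStep low acc (w, i) = acc := by
        simp only [occStep, hw, Bool.false_and, Bool.false_eq_true, if_false]
      rw [hstep]
      simp only [hw, Bool.false_or]

-- ===== VERDICT (by name: the statement is the Claim_ definition above) =====
theorem analyze_occupation_py_spec : Claim_equal_analyze_occupation_py := by
  intro occupation _
  unfold Spec_analyze_occupation_py analyze_occupation_py analyze_occupation_py_alt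
  by_cases hempty : occupation == ""
  · simp [hempty]
  · simp only [hempty, Bool.false_eq_true, if_false,
      occKeywords, occGroups, PySem.List.enumerate_cons, PySem.List.enumerate_nil,
      List.flatMap_cons, List.flatMap_nil, List.append_nil, List.foldl_append, occFold_group]
    split_ifs <;> rfl
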